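-- pv_equiv track=rewrite | github.com/venkatvi/llm_prep | mapreduce/word_count.py | reduce_word_length
-- ===== SOURCE A (Python) =====
-- from typing import Callable, Generator, Tuple, Union
--
-- REDUCE_TYPE = Union[
--     dict[str, int], # word --> count
--     Tuple[int, int], # sum of lengths of words, # number of words
--     float, # average word length
-- ]
--
-- def reduce_word_length(
--     per_line_word_length: list[Generator[Tuple[str, int], None, None]],
--     use_reduce: bool = False
-- ) -> REDUCE_TYPE :
--     # Return (total_characters, num_words) tuple for consistency
--     total_chars = 0
--     num_words = 0
--
--     for gen in per_line_word_length:
--         for word, length in gen: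
--             total_chars += length
--             num_words += 1
--
--     return (total_chars, num_words)
-- ===== SOURCE B (Python) =====
-- def reduce_word_length(per_line_word_length, use_reduce=False):
--     # Map-reduce decomposition: map each line to an independent (chars, words)
--     # summary, then reduce summaries by componentwise addition (a monoid fold).
--     def line_summary(gen):
--         lengths = [length for _, length in gen]
--         return (sum(lengths), len(lengths))
--
--     def combine(left, right):
--         return (left[0] + right[0], left[1] + right[1])
--
--     result = (0, 0)
--     for summary in map(line_summary, per_line_word_length):
--         result = combine(result, summary)
--     return result
-- ===== Notes on version B (the rewrite author's own statement) =====
-- stated objective: alternative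
-- what changed: B is a genuine map-reduce: each line is first mapped to an independent (chars, words) summary pair, and the per-line summaries are then combined by a componentwise monoid addition, instead of A's nested loops threading two shared accumulators through every word of every line.
import Mathlib
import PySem

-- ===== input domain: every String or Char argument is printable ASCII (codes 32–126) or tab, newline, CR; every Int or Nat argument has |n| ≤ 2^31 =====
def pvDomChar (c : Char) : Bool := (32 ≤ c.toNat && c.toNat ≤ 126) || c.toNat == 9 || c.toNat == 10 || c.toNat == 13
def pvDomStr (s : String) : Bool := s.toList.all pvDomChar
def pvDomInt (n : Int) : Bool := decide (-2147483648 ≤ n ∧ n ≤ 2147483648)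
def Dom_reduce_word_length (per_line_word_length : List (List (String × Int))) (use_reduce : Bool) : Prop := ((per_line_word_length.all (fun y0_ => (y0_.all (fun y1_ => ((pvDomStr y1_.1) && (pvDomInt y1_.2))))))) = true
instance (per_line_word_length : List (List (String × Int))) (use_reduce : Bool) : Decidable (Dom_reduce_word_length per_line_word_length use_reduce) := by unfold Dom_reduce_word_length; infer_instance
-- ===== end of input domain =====

-- B restates the computation as a map-reduce: per-line (chars, words) summaries combined by componentwise addition (alternative decomposition, same cost).


-- ===== PORT A =====
-- nested loops over generators, two accumulators updated together
def reduce_word_length (per_line_word_length : List (List (String × Int))) (use_reduce : Bool) : Int × Int :=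
  let st := per_line_word_length.foldl
    (fun (st : Int × Int) gen =>
      gen.foldl (fun (st : Int × Int) wl => (st.1 + wl.2, st.2 + 1)) st)
    (0, 0)
  (st.1, st.2)

-- ===== PORT B =====
-- map each line to an independent (chars, words) summary, then reduce
-- the summaries by componentwise addition
def pvLineSummary (gen : List (String × Int)) : Int × Int :=
  let lengths := gen.map (fun p => p.2)
  (lengths.sum, (lengths.length : Int))

def pvCombine (left right : Int × Int) : Int × Int :=
  (left.1 + right.1, left.2 + right.2)

def reduce_word_length_alt (per_line_word_length : List (List (String × Int))) (use_reduce : Bool) : Int × Int :=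
  (per_line_word_length.map pvLineSummary).foldl pvCombine (0, 0)

-- ===== PRECONDITION & SPEC =====
def Spec_reduce_word_length (per_line_word_length : List (List (String × Int))) (use_reduce : Bool) (out : Int × Int) : Prop := out = reduce_word_length_alt per_line_word_length use_reduce
instance (per_line_word_length : List (List (String × Int))) (use_reduce : Bool) (out : Int × Int) : Decidable (Spec_reduce_word_length per_line_word_length use_reduce out) := by unfold Spec_reduce_word_length; infer_instance

-- ===== CLAIM (what is proved, stated in full; the proofs are below) =====
def Claim_equal_reduce_word_length : Prop := ∀ (per_line_word_length : List (List (String × Int))) (use_reduce : Bool), Dom_reduce_word_length per_line_word_length use_reduce → Spec_reduce_word_length per_line_word_length use_reduce (reduce_word_length per_line_word_length use_reduce)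

-- ===== LEMMAS AND PROOFS =====

-- A's inner fold over one line shifts the accumulator by that line's summary
theorem inner_fold_eq (gen : List (String × Int)) (st : Int × Int) :
    gen.foldl (fun (st : Int × Int) wl => (st.1 + wl.2, st.2 + 1)) st
      = pvCombine st (pvLineSummary gen) := by
  induction gen generalizing st with
  | nil => simp [pvCombine, pvLineSummary]
  | cons h t ih =>
    rw [List.foldl_cons, ih]
    simp only [pvCombine, pvLineSummary, List.map_cons, List.sum_cons, List.length_cons]
    refine Prod.ext ?_ ?_ <;> push_cast <;> ring

-- hence A's outer fold is exactly B's fold of the per-line summaries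
theorem outer_fold_eq (ls : List (List (String × Int))) (st : Int × Int) :
    ls.foldl (fun (st : Int × Int) gen =>
        gen.foldl (fun (st : Int × Int) wl => (st.1 + wl.2, st.2 + 1)) st) st
      = (ls.map pvLineSummary).foldl pvCombine st := by
  induction ls generalizing st with
  | nil => simp
  | cons h t ih =>
    rw [List.foldl_cons, inner_fold_eq, ih, List.map_cons, List.foldl_cons]

-- ===== VERDICT (by name: the statement is the Claim_ definition above) =====
theorem reduce_word_length_spec : Claim_equal_reduce_word_length := by
  intro l u _
  show _ = _
  simp [reduce_word_length, reduce_word_length_alt, outer_fold_eq]
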